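-- pv_equiv track=rewrite | github.com/dlyj518/algorithm | 프로그래머스/lv3/49191. 순위/순위.py | solution
-- ===== SOURCE A (Python) =====
-- def solution(n, results):
--     w = [set() for _ in range(n+1)]
--     l = [set() for _ in range(n+1)]
--     for a, b in results:
--         w[a].add(b); l[b].add(a)
--     for i in range(1, n+1):
--         for ww in w[i]: l[ww].update(l[i])
--         for ll in l[i]: w[ll].update(w[i])
--     answer = 0
--     for i in range(1, n+1):
--         if len(w[i])+len(l[i]) == n-1: answer += 1
--     return answer
-- ===== SOURCE B (Python) =====
-- def solution(n, results):
--     reach = set(results)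
--     for k in range(1, n + 1):
--         pre = {a for a, b in reach if b == k}
--         suc = {b for a, b in reach if a == k}
--         reach |= {(a, b) for a in pre for b in suc}
--     out = [0] * (n + 1)
--     inc = [0] * (n + 1)
--     for a, b in reach:
--         out[a] += 1
--         inc[b] += 1
--     return sum(1 for i in range(1, n + 1) if out[i] + inc[i] == n - 1)
-- ===== Notes on version B (the rewrite author's own statement) =====
-- stated objective: alternative
-- what changed: Replaces A's two mutable arrays of per-node win/lose sets (closed by nested in-place set-union loops per pivot) with a single set of reachability pairs closed by one Floyd-Warshall-style pass (adding pre(k) x suc(k) per pivot), then counts per-player in/out degrees by tallying the pair set into two arrays instead of reading set sizes.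
-- outside the precondition, e.g. on solution(2, [(-3, -2), (1, 2)]): A returns 0, B returns 1
import Mathlib
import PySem

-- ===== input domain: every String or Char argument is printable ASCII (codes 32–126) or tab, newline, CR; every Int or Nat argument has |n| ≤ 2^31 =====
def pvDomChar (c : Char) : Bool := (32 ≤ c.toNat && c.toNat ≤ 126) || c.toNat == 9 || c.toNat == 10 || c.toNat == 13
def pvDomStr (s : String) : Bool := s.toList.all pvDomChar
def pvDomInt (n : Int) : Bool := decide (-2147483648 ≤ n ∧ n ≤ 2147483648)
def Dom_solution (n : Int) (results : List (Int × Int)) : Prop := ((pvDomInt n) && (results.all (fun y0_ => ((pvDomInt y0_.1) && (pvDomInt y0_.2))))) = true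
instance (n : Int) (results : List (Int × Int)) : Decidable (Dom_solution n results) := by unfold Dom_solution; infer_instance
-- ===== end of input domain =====

-- B replaces A's two mutable arrays of per-node win/lose sets with a single set of
-- reachability pairs closed by one Floyd-Warshall-style pass (alternative structure, similar cost).


-- ===== PORT A =====
-- Python's in-place `xs[i].method(...)`: read the set at index i (pyGet?, negative wraps), write back f of it.
-- Where Python raises IndexError (pyGet? = none) the input is outside Pre_ and we leave xs unchanged.
def pyUpdAt (xs : List (PySem.Set Int)) (i : Int) (f : PySem.Set Int → PySem.Set Int) : List (PySem.Set Int) :=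
  match PySem.List.pyGet? xs i with
  | some s => PySem.List.pySetD xs i (f s)
  | none   => xs

def solution (n : Int) (results : List (Int × Int)) : Int :=
  let w0 := (PySem.List.pyRange 0 (n+1) 1).map (fun _ => (PySem.Set.empty : PySem.Set Int))
  let l0 := (PySem.List.pyRange 0 (n+1) 1).map (fun _ => (PySem.Set.empty : PySem.Set Int))
  let st1 := results.foldl (fun st p =>
      (pyUpdAt st.1 p.1 (fun s => PySem.Set.add s p.2),
       pyUpdAt st.2 p.2 (fun s => PySem.Set.add s p.1))) (w0, l0)
  let st2 := (PySem.List.pyRange 1 (n+1) 1).foldl (fun st i =>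
      let l' := (PySem.List.pyGetD st.1 i PySem.Set.empty).foldl
          (fun l ww => pyUpdAt l ww (fun s => PySem.Set.update s (PySem.List.pyGetD l i PySem.Set.empty))) st.2
      let w' := (PySem.List.pyGetD l' i PySem.Set.empty).foldl
          (fun w ll => pyUpdAt w ll (fun s => PySem.Set.update s (PySem.List.pyGetD w i PySem.Set.empty))) st.1
      (w', l')) st1
  (PySem.List.pyRange 1 (n+1) 1).foldl (fun answer i =>
      if PySem.Set.len (PySem.List.pyGetD st2.1 i PySem.Set.empty)
          + PySem.Set.len (PySem.List.pyGetD st2.2 i PySem.Set.empty) = n - 1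
      then answer + 1 else answer) 0

-- ===== PORT B =====
-- Python's `xs[i] += 1` on a list of ints (pyGet?, negative wraps; none = IndexError, outside Pre_, xs kept).
def pyIncAt (xs : List Int) (i : Int) : List Int :=
  match PySem.List.pyGet? xs i with
  | some v => PySem.List.pySetD xs i (v + 1)
  | none   => xs

def solution_alt (n : Int) (results : List (Int × Int)) : Int :=
  let reach := (PySem.List.pyRange 1 (n+1) 1).foldl (fun R k =>
      let pre := PySem.Set.ofList ((R.filter (fun p => p.2 == k)).map (fun p => p.1))
      let suc := PySem.Set.ofList ((R.filter (fun p => p.1 == k)).map (fun p => p.2))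
      PySem.Set.union R (PySem.Set.ofList (pre.flatMap (fun a => suc.map (fun b => (a, b))))))
    (PySem.Set.ofList results)
  let counts := reach.foldl (fun oi p => (pyIncAt oi.1 p.1, pyIncAt oi.2 p.2))
    (PySem.List.pyRepeat [(0 : Int)] (n+1), PySem.List.pyRepeat [(0 : Int)] (n+1))
  (((PySem.List.pyRange 1 (n+1) 1).filter (fun i =>
      PySem.List.pyGetD counts.1 i 0 + PySem.List.pyGetD counts.2 i 0 == n - 1)).map
    (fun _ => (1 : Int))).sum

-- ===== PRECONDITION & SPEC =====
-- Pre_ restricts to the task's natural domain: every match result names players 0..n (the indices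
-- A's arrays address directly). Outside it A raises IndexError (label > n or < -(n+1)) or, on other
-- negative labels, silently wraps around via Python negative indexing — outside the natural domain.
def Pre_solution (n : Int) (results : List (Int × Int)) : Prop :=
  ∀ p ∈ results, 0 ≤ p.1 ∧ p.1 ≤ n ∧ 0 ≤ p.2 ∧ p.2 ≤ n
instance (n : Int) (results : List (Int × Int)) : Decidable (Pre_solution n results) := by unfold Pre_solution; infer_instance
def pvWitness_solution : Int × (List (Int × Int)) := (3, [(1, 2), (2, 3)])
def Spec_solution (n : Int) (results : List (Int × Int)) (out : Int) : Prop := out = solution_alt n results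
instance (n : Int) (results : List (Int × Int)) (out : Int) : Decidable (Spec_solution n results out) := by unfold Spec_solution; infer_instance

-- ===== CLAIM (what is proved, stated in full; the proofs are below) =====
def Claim_equal_solution : Prop := ∀ (n : Int) (results : List (Int × Int)), Dom_solution n results → Pre_solution n results → Spec_solution n results (solution n results)

-- ===== LEMMAS AND PROOFS =====

-- The simulation invariant: (a,b) ∈ B's relation R  ↔  b ∈ A's w[a]  ↔  a ∈ A's l[b].
def InvWL (n : Int) (W L : List (PySem.Set Int)) (R : PySem.Set (Int × Int)) : Prop :=
  W.length = (n+1).toNat ∧ L.length = (n+1).toNat ∧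
  R.Nodup ∧
  (∀ p ∈ R, 0 ≤ p.1 ∧ p.1 ≤ n ∧ 0 ≤ p.2 ∧ p.2 ≤ n) ∧
  (∀ s ∈ W, s.Nodup ∧ ∀ x ∈ s, 0 ≤ x ∧ x ≤ n) ∧
  (∀ s ∈ L, s.Nodup ∧ ∀ x ∈ s, 0 ≤ x ∧ x ≤ n) ∧
  (∀ a b : Int, 0 ≤ a → a ≤ n → 0 ≤ b → b ≤ n →
     (((a, b) ∈ R) ↔ b ∈ W.getD a.toNat PySem.Set.empty) ∧
     (((a, b) ∈ R) ↔ a ∈ L.getD b.toNat PySem.Set.empty))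

theorem getD_set_pv {α : Type} (xs : List α) (j : Nat) (v d : α) (hj : j < xs.length) (x : Nat) :
    (xs.set j v).getD x d = if x = j then v else xs.getD x d := by
  rcases eq_or_ne x j with rfl | h
  · simp [List.getD_eq_getElem?_getD, hj]
  · simp [List.getD_eq_getElem?_getD, h, (Ne.symm h)]

theorem update_of_subset_pv (s : PySem.Set Int) (t : List Int) (h : ∀ x ∈ t, x ∈ s) :
    PySem.Set.update s t = s := by
  rw [PySem.Set.update_eq_append_filter]
  have hf : List.filter (fun y => !s.contains y) (PySem.Set.ofList t) = [] := by
    rw [List.filter_eq_nil_iff]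
    intro a ha
    have hm : a ∈ s := h a ((PySem.Set.mem_ofList t a).mp ha)
    simp [hm]
  rw [hf, List.append_nil]

theorem pyUpdAt_eq (xs : List (PySem.Set Int)) (i : Int) (f : PySem.Set Int → PySem.Set Int)
    (h0 : 0 ≤ i) (h1 : i.toNat < xs.length) :
    pyUpdAt xs i f = xs.set i.toNat (f (xs.getD i.toNat PySem.Set.empty)) := by
  unfold pyUpdAt
  rw [PySem.List.pyGet?_of_nonneg xs h0]
  simp [PySem.List.pySetD_of_nonneg xs _ h0, List.getD_eq_getElem?_getD,
    List.getElem?_eq_getElem h1]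

-- The inner mutation loop 'for d in ds: X[d].update(X[k])': X[k] stays intact, S is unioned into X[d] for d ∈ ds.
theorem inner_fold (k : Int) (S : PySem.Set Int) (m : Nat) (hk0 : 0 ≤ k) (hk1 : k.toNat < m) :
    ∀ (ds : List Int) (X : List (PySem.Set Int)), X.length = m →
    (∀ d ∈ ds, 0 ≤ d ∧ d.toNat < m) → ds.Nodup → X.getD k.toNat PySem.Set.empty = S →
    (ds.foldl (fun l ww => pyUpdAt l ww (fun s => PySem.Set.update s (PySem.List.pyGetD l k PySem.Set.empty))) X).length = m ∧
    ∀ x : Nat,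
      (ds.foldl (fun l ww => pyUpdAt l ww (fun s => PySem.Set.update s (PySem.List.pyGetD l k PySem.Set.empty))) X).getD x PySem.Set.empty =
      if (x : Int) ∈ ds then PySem.Set.update (X.getD x PySem.Set.empty) S else X.getD x PySem.Set.empty := by
  intro ds
  induction ds with
  | nil => intro X hlen _ _ _; simp [hlen]
  | cons d ds ih =>
    intro X hlen hds hnd hXk
    obtain ⟨hd0, hd1⟩ := hds d (by simp)
    have hd1' : d.toNat < X.length := by omega
    have hkX : (k : Int) < (X.length : Int) := by omega
    have hget : PySem.List.pyGetD X k PySem.Set.empty = S := by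
      rw [PySem.List.pyGetD_eq_getElem X PySem.Set.empty hk0 (by simpa using hkX),
        ← List.getD_eq_getElem X PySem.Set.empty (by omega)]
      exact hXk
    have hstep : pyUpdAt X d (fun s => PySem.Set.update s (PySem.List.pyGetD X k PySem.Set.empty))
        = X.set d.toNat (PySem.Set.update (X.getD d.toNat PySem.Set.empty) S) := by
      rw [pyUpdAt_eq X d _ hd0 hd1', hget]
    have hnd' : ds.Nodup := (List.nodup_cons.mp hnd).2
    have hdnotin : d ∉ ds := (List.nodup_cons.mp hnd).1
    set X1 := X.set d.toNat (PySem.Set.update (X.getD d.toNat PySem.Set.empty) S) with hX1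
    have hlen1 : X1.length = m := by simp [hX1, hlen]
    have hX1k : X1.getD k.toNat PySem.Set.empty = S := by
      rw [hX1, getD_set_pv X d.toNat _ _ hd1' k.toNat]
      rcases eq_or_ne k.toNat d.toNat with he | he
      · rw [if_pos he, ← he, hXk]
        exact update_of_subset_pv S S (fun x hx => hx)
      · rw [if_neg he]
        exact hXk
    obtain ⟨hl2, hform⟩ := ih X1 hlen1 (fun e he => hds e (by simp [he])) hnd' hX1k
    constructor
    · simpa only [List.foldl_cons, hstep] using hl2
    · intro x
      have hfx := hform x
      simp only [List.foldl_cons, hstep]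
      rw [hfx]
      rcases eq_or_ne x d.toNat with he | hx
      · have hxi : (x : Int) = d := by omega
        rw [if_neg (by simp [hxi, hdnotin]), if_pos (by simp [hxi])]
        rw [hX1, getD_set_pv X d.toNat _ _ hd1' x, if_pos he, he]
      · have hX1x : X1.getD x PySem.Set.empty = X.getD x PySem.Set.empty := by
          rw [hX1, getD_set_pv X d.toNat _ _ hd1' x, if_neg hx]
        have hxd : ¬ ((x : Int) = d) := by intro hc; omega
        rw [hX1x]
        by_cases hmem : (x : Int) ∈ ds
        · rw [if_pos hmem, if_pos (by simp [hmem])]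
        · rw [if_neg hmem, if_neg (by simp [hmem, hxd])]

-- One pivot step of the closure: A's two inner loops match B's pre×suc union, preserving the invariant.
set_option maxHeartbeats 1000000 in
theorem step_inv (n i : Int) (W L : List (PySem.Set Int)) (R : PySem.Set (Int × Int))
    (hInv : InvWL n W L R) (hi1 : 1 ≤ i) (hi2 : i ≤ n) :
    InvWL n
      ((PySem.List.pyGetD ((PySem.List.pyGetD W i PySem.Set.empty).foldl
            (fun l ww => pyUpdAt l ww (fun s => PySem.Set.update s (PySem.List.pyGetD l i PySem.Set.empty))) L) i PySem.Set.empty).foldl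
         (fun w ll => pyUpdAt w ll (fun s => PySem.Set.update s (PySem.List.pyGetD w i PySem.Set.empty))) W)
      ((PySem.List.pyGetD W i PySem.Set.empty).foldl
         (fun l ww => pyUpdAt l ww (fun s => PySem.Set.update s (PySem.List.pyGetD l i PySem.Set.empty))) L)
      (PySem.Set.union R (PySem.Set.ofList
        ((PySem.Set.ofList ((R.filter (fun p => p.2 == i)).map (fun p => p.1))).flatMap
          (fun a => (PySem.Set.ofList ((R.filter (fun p => p.1 == i)).map (fun p => p.2))).map (fun b => (a, b)))))) := by
  obtain ⟨hWlen, hLlen, hRnd, hRrange, hWsets, hLsets, hIff⟩ := hInv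
  have hi0 : 0 ≤ i := by omega
  have him : i.toNat < (n+1).toNat := by omega
  have hiW : i.toNat < W.length := by omega
  have hiL : i.toNat < L.length := by omega
  set Wi := W.getD i.toNat PySem.Set.empty with hWi
  set Li := L.getD i.toNat PySem.Set.empty with hLi
  have hWiMem : Wi ∈ W := by rw [hWi, List.getD_eq_getElem W _ hiW]; exact List.getElem_mem hiW
  have hLiMem : Li ∈ L := by rw [hLi, List.getD_eq_getElem L _ hiL]; exact List.getElem_mem hiL
  have hWiP := hWsets Wi hWiMem
  have hLiP := hLsets Li hLiMem
  have hgetW : PySem.List.pyGetD W i PySem.Set.empty = Wi := by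
    rw [PySem.List.pyGetD_eq_getElem W PySem.Set.empty hi0 (by exact_mod_cast by omega),
      ← List.getD_eq_getElem W PySem.Set.empty hiW]
  obtain ⟨hl'len, hl'form⟩ := inner_fold i Li (n+1).toNat hi0 him Wi L hLlen
    (fun d hd => ⟨(hWiP.2 d hd).1, by have := hWiP.2 d hd; omega⟩) hWiP.1 rfl
  rw [hgetW]
  set l' := Wi.foldl (fun l ww => pyUpdAt l ww (fun s => PySem.Set.update s (PySem.List.pyGetD l i PySem.Set.empty))) L with hl'
  have hl'i : l'.getD i.toNat PySem.Set.empty = Li := by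
    rw [hl'form i.toNat]
    by_cases hmem : ((i.toNat : Int)) ∈ Wi
    · rw [if_pos hmem]; exact update_of_subset_pv Li Li (fun x hx => hx)
    · rw [if_neg hmem]
  have hgetl' : PySem.List.pyGetD l' i PySem.Set.empty = Li := by
    rw [PySem.List.pyGetD_eq_getElem l' PySem.Set.empty hi0 (by rw [hl'len]; exact_mod_cast by omega),
      ← List.getD_eq_getElem l' PySem.Set.empty (by omega), hl'i]
  obtain ⟨hw'len, hw'form⟩ := inner_fold i Wi (n+1).toNat hi0 him Li W hWlen
    (fun d hd => ⟨(hLiP.2 d hd).1, by have := hLiP.2 d hd; omega⟩) hLiP.1 rfl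
  rw [hgetl']
  set w' := Li.foldl (fun w ll => pyUpdAt w ll (fun s => PySem.Set.update s (PySem.List.pyGetD w i PySem.Set.empty))) W with hw'
  clear_value l' w'
  -- membership characterisations on B's side
  have hpre : ∀ x : Int, x ∈ PySem.Set.ofList ((R.filter (fun p => p.2 == i)).map (fun p => p.1)) ↔ (x, i) ∈ R := by
    intro x
    rw [PySem.Set.mem_ofList]
    simp only [List.mem_map, List.mem_filter, beq_iff_eq]
    constructor
    · rintro ⟨p, ⟨hpR, hp2⟩, hp1⟩
      have : p = (x, i) := by
        cases p; simp_all
      rwa [this] at hpR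
    · intro h; exact ⟨(x, i), ⟨h, rfl⟩, rfl⟩
  have hsuc : ∀ x : Int, x ∈ PySem.Set.ofList ((R.filter (fun p => p.1 == i)).map (fun p => p.2)) ↔ (i, x) ∈ R := by
    intro x
    rw [PySem.Set.mem_ofList]
    simp only [List.mem_map, List.mem_filter, beq_iff_eq]
    constructor
    · rintro ⟨p, ⟨hpR, hp1⟩, hp2⟩
      have : p = (i, x) := by
        cases p; simp_all
      rwa [this] at hpR
    · intro h; exact ⟨(i, x), ⟨h, rfl⟩, rfl⟩
  have hR' : ∀ a b : Int,
      ((a, b) ∈ PySem.Set.union R (PySem.Set.ofList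
        ((PySem.Set.ofList ((R.filter (fun p => p.2 == i)).map (fun p => p.1))).flatMap
          (fun a => (PySem.Set.ofList ((R.filter (fun p => p.1 == i)).map (fun p => p.2))).map (fun b => (a, b))))))
      ↔ ((a, b) ∈ R ∨ ((a, i) ∈ R ∧ (i, b) ∈ R)) := by
    intro a b
    rw [PySem.Set.mem_union, PySem.Set.mem_ofList]
    simp only [List.mem_flatMap, List.mem_map]
    constructor
    · rintro (h | ⟨a', ha', b', hb', hab⟩)
      · exact Or.inl h
      · have haa : a' = a := congrArg Prod.fst hab
        have hbb : b' = b := congrArg Prod.snd hab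
        exact Or.inr ⟨(hpre a).mp (haa ▸ ha'), (hsuc b).mp (hbb ▸ hb')⟩
    · rintro (h | ⟨h1, h2⟩)
      · exact Or.inl h
      · exact Or.inr ⟨a, (hpre a).mpr h1, b, (hsuc b).mpr h2, rfl⟩
  refine ⟨by rw [hw'len], by rw [hl'len], ?_, ?_, ?_, ?_, ?_⟩
  · exact PySem.Set.nodup_union R _ hRnd
  · intro p hp
    rw [PySem.Set.mem_union] at hp
    rcases hp with h | h
    · exact hRrange p h
    · rw [PySem.Set.mem_ofList] at h
      simp only [List.mem_flatMap, List.mem_map] at h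
      obtain ⟨a', ha', b', hb', hab⟩ := h
      have h1 := hRrange _ ((hpre a').mp ha')
      have h2 := hRrange _ ((hsuc b').mp hb')
      rw [← hab]
      exact ⟨h1.1, h1.2.1, h2.2.2.1, h2.2.2.2⟩
  · intro s hs
    obtain ⟨j, hj, hjs⟩ := List.mem_iff_getElem.mp hs
    have hjm : j < (n+1).toNat := by rw [← hw'len]; exact hj
    have hjW : j < W.length := by omega
    have hsj : s = w'.getD j PySem.Set.empty := by rw [List.getD_eq_getElem w' _ hj, hjs]
    rw [hsj, hw'form j]
    by_cases hmem : ((j : Int)) ∈ Li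
    · rw [if_pos hmem]
      have hbase := hWsets (W.getD j PySem.Set.empty)
        (by rw [List.getD_eq_getElem W _ hjW]; exact List.getElem_mem hjW)
      refine ⟨PySem.Set.nodup_update _ _ hbase.1, ?_⟩
      intro x hx
      rw [PySem.Set.mem_update] at hx
      rcases hx with h | h
      · exact hbase.2 x h
      · exact hWiP.2 x h
    · rw [if_neg hmem]
      exact hWsets _ (by rw [List.getD_eq_getElem W _ hjW]; exact List.getElem_mem hjW)
  · intro s hs
    obtain ⟨j, hj, hjs⟩ := List.mem_iff_getElem.mp hs
    have hjm : j < (n+1).toNat := by rw [← hl'len]; exact hj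
    have hjL : j < L.length := by omega
    have hsj : s = l'.getD j PySem.Set.empty := by rw [List.getD_eq_getElem l' _ hj, hjs]
    rw [hsj, hl'form j]
    by_cases hmem : ((j : Int)) ∈ Wi
    · rw [if_pos hmem]
      have hbase := hLsets (L.getD j PySem.Set.empty)
        (by rw [List.getD_eq_getElem L _ hjL]; exact List.getElem_mem hjL)
      refine ⟨PySem.Set.nodup_update _ _ hbase.1, ?_⟩
      intro x hx
      rw [PySem.Set.mem_update] at hx
      rcases hx with h | h
      · exact hbase.2 x h
      · exact hLiP.2 x h
    · rw [if_neg hmem]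
      exact hLsets _ (by rw [List.getD_eq_getElem L _ hjL]; exact List.getElem_mem hjL)
  · intro a b ha0 ha1 hb0 hb1
    have haL : (a, i) ∈ R ↔ a ∈ Li := (hIff a i ha0 ha1 (by omega) hi2).2
    have hbW : (i, b) ∈ R ↔ b ∈ Wi := (hIff i b (by omega) hi2 hb0 hb1).1
    have habW : (a, b) ∈ R ↔ b ∈ W.getD a.toNat PySem.Set.empty := (hIff a b ha0 ha1 hb0 hb1).1
    have habL : (a, b) ∈ R ↔ a ∈ L.getD b.toNat PySem.Set.empty := (hIff a b ha0 ha1 hb0 hb1).2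
    have hacast : ((a.toNat : Int)) = a := Int.toNat_of_nonneg ha0
    have hbcast : ((b.toNat : Int)) = b := Int.toNat_of_nonneg hb0
    constructor
    · rw [hR' a b, hw'form a.toNat, hacast]
      by_cases hmem : a ∈ Li
      · rw [if_pos hmem, PySem.Set.mem_update]
        rw [← habW, ← hbW]
        have haR : (a, i) ∈ R := haL.mpr hmem
        tauto
      · rw [if_neg hmem, ← habW]
        have : ¬ (a, i) ∈ R := fun h => hmem (haL.mp h)
        tauto
    · rw [hR' a b, hl'form b.toNat, hbcast]
      by_cases hmem : b ∈ Wi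
      · rw [if_pos hmem, PySem.Set.mem_update]
        rw [← habL, ← haL]
        have hbR : (i, b) ∈ R := hbW.mpr hmem
        tauto
      · rw [if_neg hmem, ← habL]
        have : ¬ (i, b) ∈ R := fun h => hmem (hbW.mp h)
        tauto

theorem closure_fold (n : Int) :
    ∀ (ks : List Int) (WL : List (PySem.Set Int) × List (PySem.Set Int)) (R : PySem.Set (Int × Int)),
    (∀ k ∈ ks, 1 ≤ k ∧ k ≤ n) → InvWL n WL.1 WL.2 R →
    InvWL n
      (ks.foldl (fun st i =>
        let l' := (PySem.List.pyGetD st.1 i PySem.Set.empty).foldl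
            (fun l ww => pyUpdAt l ww (fun s => PySem.Set.update s (PySem.List.pyGetD l i PySem.Set.empty))) st.2
        let w' := (PySem.List.pyGetD l' i PySem.Set.empty).foldl
            (fun w ll => pyUpdAt w ll (fun s => PySem.Set.update s (PySem.List.pyGetD w i PySem.Set.empty))) st.1
        (w', l')) WL).1
      (ks.foldl (fun st i =>
        let l' := (PySem.List.pyGetD st.1 i PySem.Set.empty).foldl
            (fun l ww => pyUpdAt l ww (fun s => PySem.Set.update s (PySem.List.pyGetD l i PySem.Set.empty))) st.2
        let w' := (PySem.List.pyGetD l' i PySem.Set.empty).foldl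
            (fun w ll => pyUpdAt w ll (fun s => PySem.Set.update s (PySem.List.pyGetD w i PySem.Set.empty))) st.1
        (w', l')) WL).2
      (ks.foldl (fun R k =>
        let pre := PySem.Set.ofList ((R.filter (fun p => p.2 == k)).map (fun p => p.1))
        let suc := PySem.Set.ofList ((R.filter (fun p => p.1 == k)).map (fun p => p.2))
        PySem.Set.union R (PySem.Set.ofList (pre.flatMap (fun a => suc.map (fun b => (a, b)))))) R) := by
  intro ks
  induction ks with
  | nil => intro WL R _ hInv; exact hInv
  | cons k ks ih =>
    intro WL R hks hInv
    simp only [List.foldl_cons]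
    exact ih _ _ (fun e he => hks e (by simp [he]))
      (step_inv n k WL.1 WL.2 R hInv (hks k (by simp)).1 (hks k (by simp)).2)

theorem build_step (n a b : Int) (W L : List (PySem.Set Int)) (R : PySem.Set (Int × Int))
    (hInv : InvWL n W L R) (ha0 : 0 ≤ a) (ha1 : a ≤ n) (hb0 : 0 ≤ b) (hb1 : b ≤ n) :
    InvWL n (pyUpdAt W a (fun s => PySem.Set.add s b)) (pyUpdAt L b (fun s => PySem.Set.add s a))
      (PySem.Set.add R (a, b)) := by
  obtain ⟨hWlen, hLlen, hRnd, hRrange, hWsets, hLsets, hIff⟩ := hInv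
  have haW : a.toNat < W.length := by omega
  have hbL : b.toNat < L.length := by omega
  rw [pyUpdAt_eq W a _ ha0 haW, pyUpdAt_eq L b _ hb0 hbL]
  refine ⟨by simp [hWlen], by simp [hLlen], PySem.Set.nodup_add R _ hRnd, ?_, ?_, ?_, ?_⟩
  · intro p hp
    rw [PySem.Set.mem_add] at hp
    rcases hp with h | h
    · exact hRrange p h
    · rw [h]; exact ⟨ha0, ha1, hb0, hb1⟩
  · intro s hs
    rcases List.mem_or_eq_of_mem_set hs with h | h
    · exact hWsets s h
    · have hbase := hWsets (W.getD a.toNat PySem.Set.empty)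
        (by rw [List.getD_eq_getElem W _ haW]; exact List.getElem_mem haW)
      rw [h]
      refine ⟨PySem.Set.nodup_add _ _ hbase.1, ?_⟩
      intro x hx
      rw [PySem.Set.mem_add] at hx
      rcases hx with h' | h'
      · exact hbase.2 x h'
      · rw [h']; exact ⟨hb0, hb1⟩
  · intro s hs
    rcases List.mem_or_eq_of_mem_set hs with h | h
    · exact hLsets s h
    · have hbase := hLsets (L.getD b.toNat PySem.Set.empty)
        (by rw [List.getD_eq_getElem L _ hbL]; exact List.getElem_mem hbL)
      rw [h]
      refine ⟨PySem.Set.nodup_add _ _ hbase.1, ?_⟩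
      intro x hx
      rw [PySem.Set.mem_add] at hx
      rcases hx with h' | h'
      · exact hbase.2 x h'
      · rw [h']; exact ⟨ha0, ha1⟩
  · intro a' b' ha0' ha1' hb0' hb1'
    have h1 := (hIff a' b' ha0' ha1' hb0' hb1').1
    have h2 := (hIff a' b' ha0' ha1' hb0' hb1').2
    have hpair : ((a', b') = (a, b)) ↔ (a' = a ∧ b' = b) := by
      constructor
      · intro h; exact ⟨congrArg Prod.fst h, congrArg Prod.snd h⟩
      · rintro ⟨rfl, rfl⟩; rfl
    constructor
    · rw [PySem.Set.mem_add, getD_set_pv W a.toNat _ _ haW a'.toNat, hpair, h1]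
      rcases eq_or_ne a' a with rfl | hne
      · rw [if_pos (by rfl), PySem.Set.mem_add]
        tauto
      · rw [if_neg (by intro hc; apply hne; omega)]
        have : ¬ (a' = a ∧ b' = b) := fun h => hne h.1
        tauto
    · rw [PySem.Set.mem_add, getD_set_pv L b.toNat _ _ hbL b'.toNat, hpair, h2]
      rcases eq_or_ne b' b with rfl | hne
      · rw [if_pos (by rfl), PySem.Set.mem_add]
        tauto
      · rw [if_neg (by intro hc; apply hne; omega)]
        have : ¬ (a' = a ∧ b' = b) := fun h => hne h.2
        tauto

theorem build_fold (n : Int) :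
    ∀ (rs : List (Int × Int)) (WL : List (PySem.Set Int) × List (PySem.Set Int)) (R : PySem.Set (Int × Int)),
    InvWL n WL.1 WL.2 R → (∀ p ∈ rs, 0 ≤ p.1 ∧ p.1 ≤ n ∧ 0 ≤ p.2 ∧ p.2 ≤ n) →
    InvWL n
      (rs.foldl (fun st p =>
        (pyUpdAt st.1 p.1 (fun s => PySem.Set.add s p.2),
         pyUpdAt st.2 p.2 (fun s => PySem.Set.add s p.1))) WL).1
      (rs.foldl (fun st p =>
        (pyUpdAt st.1 p.1 (fun s => PySem.Set.add s p.2),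
         pyUpdAt st.2 p.2 (fun s => PySem.Set.add s p.1))) WL).2
      (rs.foldl PySem.Set.add R) := by
  intro rs
  induction rs with
  | nil => intro WL R hInv _; exact hInv
  | cons p rs ih =>
    intro WL R hInv hrs
    obtain ⟨h1, h2, h3, h4⟩ := hrs p (by simp)
    simp only [List.foldl_cons]
    exact ih _ _ (build_step n p.1 p.2 WL.1 WL.2 R hInv h1 h2 h3 h4) (fun q hq => hrs q (by simp [hq]))

theorem init_inv (n : Int) :
    InvWL n ((PySem.List.pyRange 0 (n+1) 1).map (fun _ => (PySem.Set.empty : PySem.Set Int)))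
            ((PySem.List.pyRange 0 (n+1) 1).map (fun _ => (PySem.Set.empty : PySem.Set Int)))
            ([] : PySem.Set (Int × Int)) := by
  have hlen : ((PySem.List.pyRange 0 (n+1) 1).map (fun _ => (PySem.Set.empty : PySem.Set Int))).length = (n+1).toNat := by
    rw [List.length_map, PySem.List.length_pyRange_one]
    omega
  have hgetD : ∀ x : Nat,
      ((PySem.List.pyRange 0 (n+1) 1).map (fun _ => (PySem.Set.empty : PySem.Set Int))).getD x PySem.Set.empty
        = PySem.Set.empty := by
    intro x
    rw [List.getD_eq_getElem?_getD, List.getElem?_map]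
    cases (PySem.List.pyRange 0 (n+1) 1)[x]? <;> simp
  refine ⟨hlen, hlen, List.nodup_nil, by simp, ?_, ?_, ?_⟩
  · intro s hs
    obtain ⟨_, _, rfl⟩ := List.mem_map.mp hs
    exact ⟨List.nodup_nil, by simp [PySem.Set.empty]⟩
  · intro s hs
    obtain ⟨_, _, rfl⟩ := List.mem_map.mp hs
    exact ⟨List.nodup_nil, by simp [PySem.Set.empty]⟩
  · intro a b _ _ _ _
    rw [hgetD, hgetD]
    simp [PySem.Set.empty]

theorem incAt_eq (xs : List Int) (i : Int) (h0 : 0 ≤ i) (h1 : i.toNat < xs.length) :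
    pyIncAt xs i = xs.set i.toNat (xs.getD i.toNat 0 + 1) := by
  unfold pyIncAt
  rw [PySem.List.pyGet?_of_nonneg xs h0]
  simp [PySem.List.pySetD_of_nonneg xs _ h0, List.getD_eq_getElem?_getD,
    List.getElem?_eq_getElem h1]

-- tallying 'o[key p] += 1' over a list of pairs counts, at each cell, the pairs keyed there
theorem tally_getD (key : Int × Int → Int) (m : Nat) :
    ∀ (ps : List (Int × Int)) (O : List Int), O.length = m →
    (∀ p ∈ ps, 0 ≤ key p ∧ (key p).toNat < m) →
    (ps.foldl (fun o p => pyIncAt o (key p)) O).length = m ∧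
    ∀ x : Nat, x < m → (ps.foldl (fun o p => pyIncAt o (key p)) O).getD x 0 =
      O.getD x 0 + (ps.countP (fun p => key p == (x : Int)) : Int) := by
  intro ps
  induction ps with
  | nil => intro O hlen _; simp [hlen]
  | cons p ps ih =>
    intro O hlen hps
    obtain ⟨hp0, hp1⟩ := hps p (by simp)
    have hp1' : (key p).toNat < O.length := by omega
    have hstep : pyIncAt O (key p) = O.set (key p).toNat (O.getD (key p).toNat 0 + 1) :=
      incAt_eq O (key p) hp0 hp1'
    set O1 := O.set (key p).toNat (O.getD (key p).toNat 0 + 1) with hO1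
    have hlen1 : O1.length = m := by simp [hO1, hlen]
    obtain ⟨hl2, hform⟩ := ih O1 hlen1 (fun q hq => hps q (by simp [hq]))
    constructor
    · simpa only [List.foldl_cons, hstep] using hl2
    · intro x hx
      simp only [List.foldl_cons, hstep]
      rw [hform x hx, List.countP_cons, hO1, getD_set_pv O (key p).toNat _ _ hp1' x]
      rcases eq_or_ne x (key p).toNat with he | hne
      · have hbe : (key p == (x : Int)) = true := by
          simp only [beq_iff_eq]; omega
        rw [if_pos he, hbe, if_pos rfl, he]
        push_cast
        ring
      · have hbe : (key p == (x : Int)) = false := by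
          simp only [beq_eq_false_iff_ne, ne_eq]
          intro hc; omega
        rw [if_neg hne, hbe]
        simp

theorem getD_pyRepeat_zero (n : Int) (x : Nat) :
    (PySem.List.pyRepeat [(0 : Int)] n).getD x 0 = 0 := by
  rw [PySem.List.pyRepeat_singleton]
  rw [List.getD_eq_getElem?_getD, List.getElem?_replicate]
  split <;> simp

theorem count_eq (n : Int) (W L : List (PySem.Set Int)) (R : PySem.Set (Int × Int))
    (hInv : InvWL n W L R) :
    (PySem.List.pyRange 1 (n+1) 1).foldl (fun answer i =>
      if PySem.Set.len (PySem.List.pyGetD W i PySem.Set.empty)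
          + PySem.Set.len (PySem.List.pyGetD L i PySem.Set.empty) = n - 1
      then answer + 1 else answer) (0 : Int)
    = (((PySem.List.pyRange 1 (n+1) 1).filter (fun i =>
        PySem.List.pyGetD (R.foldl (fun oi p => (pyIncAt oi.1 p.1, pyIncAt oi.2 p.2))
          (PySem.List.pyRepeat [(0 : Int)] (n+1), PySem.List.pyRepeat [(0 : Int)] (n+1))).1 i 0
        + PySem.List.pyGetD (R.foldl (fun oi p => (pyIncAt oi.1 p.1, pyIncAt oi.2 p.2))
          (PySem.List.pyRepeat [(0 : Int)] (n+1), PySem.List.pyRepeat [(0 : Int)] (n+1))).2 i 0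
        == n - 1)).map (fun _ => (1 : Int))).sum := by
  obtain ⟨hWlen, hLlen, hRnd, hRrange, hWsets, hLsets, hIff⟩ := hInv
  -- split the paired tally into two independent folds
  rw [PySem.List.foldl_prod_mk (f := fun o (p : Int × Int) => pyIncAt o p.1)
      (g := fun o (p : Int × Int) => pyIncAt o p.2)]
  have hrepl : (PySem.List.pyRepeat [(0 : Int)] (n+1)).length = (n+1).toNat := by
    rw [PySem.List.pyRepeat_singleton, List.length_replicate]
  obtain ⟨hOlen, hOform⟩ := tally_getD (fun p => p.1) (n+1).toNat R
    (PySem.List.pyRepeat [(0 : Int)] (n+1)) hrepl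
    (fun p hp => ⟨(hRrange p hp).1, by have := hRrange p hp; simp only []; omega⟩)
  obtain ⟨hIlen, hIform⟩ := tally_getD (fun p => p.2) (n+1).toNat R
    (PySem.List.pyRepeat [(0 : Int)] (n+1)) hrepl
    (fun p hp => ⟨(hRrange p hp).2.2.1, by have := hRrange p hp; simp only []; omega⟩)
  -- LHS: a counting loop is countP; RHS: a sum of ones over a filter is its length, i.e. countP
  rw [PySem.List.foldl_ite_add_one, PySem.List.sum_map_const_int, mul_one, zero_add,
    ← List.countP_eq_length_filter]
  congr 1
  apply List.countP_congr
  intro i hi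
  rw [PySem.List.mem_pyRange_one] at hi
  have hi0 : 0 ≤ i := by omega
  have hiW : i.toNat < W.length := by omega
  have hiL : i.toNat < L.length := by omega
  have him : i.toNat < (n+1).toNat := by omega
  set Wi := W.getD i.toNat PySem.Set.empty with hWiDef
  set Li := L.getD i.toNat PySem.Set.empty with hLiDef
  have hWiMem : Wi ∈ W := by rw [hWiDef, List.getD_eq_getElem W _ hiW]; exact List.getElem_mem hiW
  have hLiMem : Li ∈ L := by rw [hLiDef, List.getD_eq_getElem L _ hiL]; exact List.getElem_mem hiL
  -- out-count: the first tally cell i equals |w[i]|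
  have hout : PySem.List.pyGetD
      (R.foldl (fun o p => pyIncAt o p.1) (PySem.List.pyRepeat [(0 : Int)] (n+1))) i 0
      = PySem.Set.len (PySem.List.pyGetD W i PySem.Set.empty) := by
    rw [PySem.List.pyGetD_eq_getElem _ 0 hi0 (by rw [hOlen]; exact_mod_cast by omega),
      ← List.getD_eq_getElem _ 0 (by omega)]
    have := hOform i.toNat him
    rw [Int.toNat_of_nonneg hi0] at this
    rw [this, getD_pyRepeat_zero, zero_add]
    rw [PySem.List.pyGetD_eq_getElem W PySem.Set.empty hi0 (by exact_mod_cast by omega),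
      ← List.getD_eq_getElem W PySem.Set.empty hiW, ← hWiDef]
    have hperm : ((R.filter (fun p => p.1 == i)).map (fun p => p.2)).Perm Wi := by
      rw [List.perm_ext_iff_of_nodup ?_ (hWsets Wi hWiMem).1]
      · intro b
        have hmm : b ∈ (R.filter (fun p => p.1 == i)).map (fun p => p.2) ↔ (i, b) ∈ R := by
          simp only [List.mem_map, List.mem_filter, beq_iff_eq]
          constructor
          · rintro ⟨p, ⟨hpR, hp1⟩, hp2⟩
            have : p = (i, b) := by cases p; simp_all
            rwa [this] at hpR
          · intro h; exact ⟨(i, b), ⟨h, rfl⟩, rfl⟩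
        rw [hmm]
        by_cases hbr : 0 ≤ b ∧ b ≤ n
        · exact (hIff i b hi0 (by omega) hbr.1 hbr.2).1
        · constructor
          · intro h; exact absurd ⟨(hRrange _ h).2.2.1, (hRrange _ h).2.2.2⟩ hbr
          · intro h; exact absurd ⟨((hWsets Wi hWiMem).2 b h).1, ((hWsets Wi hWiMem).2 b h).2⟩ hbr
      · apply List.Nodup.map_on
        · intro x hx y hy hxy
          have hx1 : x.1 = i := by simpa using (List.mem_filter.mp hx).2
          have hy1 : y.1 = i := by simpa using (List.mem_filter.mp hy).2
          exact Prod.ext_iff.mpr ⟨hx1.trans hy1.symm, hxy⟩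
        · exact hRnd.filter _
    have hlen := hperm.length_eq
    rw [List.length_map] at hlen
    rw [PySem.Set.len, ← hlen, List.countP_eq_length_filter]
  -- in-count: the second tally cell i equals |l[i]|
  have hinc : PySem.List.pyGetD
      (R.foldl (fun o p => pyIncAt o p.2) (PySem.List.pyRepeat [(0 : Int)] (n+1))) i 0
      = PySem.Set.len (PySem.List.pyGetD L i PySem.Set.empty) := by
    rw [PySem.List.pyGetD_eq_getElem _ 0 hi0 (by rw [hIlen]; exact_mod_cast by omega),
      ← List.getD_eq_getElem _ 0 (by omega)]
    have := hIform i.toNat him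
    rw [Int.toNat_of_nonneg hi0] at this
    rw [this, getD_pyRepeat_zero, zero_add]
    rw [PySem.List.pyGetD_eq_getElem L PySem.Set.empty hi0 (by exact_mod_cast by omega),
      ← List.getD_eq_getElem L PySem.Set.empty hiL, ← hLiDef]
    have hperm : ((R.filter (fun p => p.2 == i)).map (fun p => p.1)).Perm Li := by
      rw [List.perm_ext_iff_of_nodup ?_ (hLsets Li hLiMem).1]
      · intro a
        have hmm : a ∈ (R.filter (fun p => p.2 == i)).map (fun p => p.1) ↔ (a, i) ∈ R := by
          simp only [List.mem_map, List.mem_filter, beq_iff_eq]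
          constructor
          · rintro ⟨p, ⟨hpR, hp2⟩, hp1⟩
            have : p = (a, i) := by cases p; simp_all
            rwa [this] at hpR
          · intro h; exact ⟨(a, i), ⟨h, rfl⟩, rfl⟩
        rw [hmm]
        by_cases har : 0 ≤ a ∧ a ≤ n
        · exact (hIff a i har.1 har.2 hi0 (by omega)).2
        · constructor
          · intro h; exact absurd ⟨(hRrange _ h).1, (hRrange _ h).2.1⟩ har
          · intro h; exact absurd ⟨((hLsets Li hLiMem).2 a h).1, ((hLsets Li hLiMem).2 a h).2⟩ har
      · apply List.Nodup.map_on
        · intro x hx y hy hxy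
          have hx2 : x.2 = i := by simpa using (List.mem_filter.mp hx).2
          have hy2 : y.2 = i := by simpa using (List.mem_filter.mp hy).2
          exact Prod.ext_iff.mpr ⟨hxy, hx2.trans hy2.symm⟩
        · exact hRnd.filter _
    have hlen := hperm.length_eq
    rw [List.length_map] at hlen
    rw [PySem.Set.len, ← hlen, List.countP_eq_length_filter]
  rw [hout, hinc]
  simp [beq_iff_eq]

-- ===== VERDICT (by name: the statement is the Claim_ definition above) =====
set_option maxHeartbeats 2000000 in
theorem solution_spec : Claim_equal_solution := by
  intro n results _hDom hPre
  unfold Spec_solution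
  show solution n results = solution_alt n results
  unfold solution solution_alt
  rw [PySem.Set.ofList_eq_foldl results]
  have h0 := init_inv n
  have h1 := build_fold n results
    ((PySem.List.pyRange 0 (n+1) 1).map (fun _ => (PySem.Set.empty : PySem.Set Int)),
     (PySem.List.pyRange 0 (n+1) 1).map (fun _ => (PySem.Set.empty : PySem.Set Int))) [] h0 hPre
  have h2 := closure_fold n (PySem.List.pyRange 1 (n+1) 1) _ _
    (fun k hk => by rw [PySem.List.mem_pyRange_one] at hk; omega) h1
  exact count_eq n _ _ _ h2
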